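-- pv_equiv track=rewrite | github.com/vishm/tibcorvstatscrape | tibcorvdaemon_statscrape.py | prefix_halfitem_with
-- ===== SOURCE A (Python) =====
-- def prefix_halfitem_with(prefix1:str, prefix2:str, collection: list):
--     retvalue = []
--     for i in range(0, len(collection)):
--         if i < len(collection) / 2:
--             retvalue.append(prefix1 + collection[i])
--         else:
--             retvalue.append(prefix2 + collection[i])
--     return retvalue
-- ===== SOURCE B (Python) =====
-- def prefix_halfitem_with(prefix1: str, prefix2: str, collection: list):
--     # Tortoise-and-hare: a fast cursor advancing two steps per element locates
--     # the half point without any division or per-element halfway comparison.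
--     retvalue = []
--     n = len(collection)
--     i = 0
--     fast = 0
--     while fast < n:
--         retvalue.append(prefix1 + collection[i])
--         i += 1
--         fast += 2
--     while i < n:
--         retvalue.append(prefix2 + collection[i])
--         i += 1
--     return retvalue
-- ===== Notes on version B (the rewrite author's own statement) =====
-- stated objective: alternative
-- what changed: Replaces A's single indexed loop with a per-element float-halfway comparison by a tortoise-and-hare scheme: a fast cursor stepping by 2 locates the split, giving two staged branch-free loops (prefix1 phase, then prefix2 phase) with no division at all.
import Mathlib
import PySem

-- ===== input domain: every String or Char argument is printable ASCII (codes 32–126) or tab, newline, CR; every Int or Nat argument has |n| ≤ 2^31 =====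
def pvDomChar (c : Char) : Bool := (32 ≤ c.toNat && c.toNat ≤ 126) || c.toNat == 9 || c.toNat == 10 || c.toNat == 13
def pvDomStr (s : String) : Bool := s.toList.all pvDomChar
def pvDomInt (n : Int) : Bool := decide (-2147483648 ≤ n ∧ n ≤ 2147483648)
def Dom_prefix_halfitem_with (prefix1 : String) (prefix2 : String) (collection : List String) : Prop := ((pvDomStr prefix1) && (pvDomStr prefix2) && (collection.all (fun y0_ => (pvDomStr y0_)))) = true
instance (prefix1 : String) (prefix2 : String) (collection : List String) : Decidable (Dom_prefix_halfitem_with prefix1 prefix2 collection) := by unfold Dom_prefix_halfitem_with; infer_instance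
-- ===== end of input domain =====

-- B replaces A's indexed loop with a per-element float-halfway branch by a tortoise-and-hare
-- scheme: a fast cursor stepping by 2 locates the split, then two staged branch-free loops
-- (objective: alternative; same O(n) cost).

-- ===== PORT A =====
-- for i in range(0, len(collection)): if i < len(collection)/2 … ; the float comparison
-- 'i < n/2' on ints i, n (n a small list length) is exactly the integer comparison 2*i < n.
def prefix_halfitem_with (prefix1 : String) (prefix2 : String) (collection : List String) : List String :=
  (PySem.List.pyRange 0 (collection.length : Int) 1).foldl
    (fun retvalue i =>
      if 2 * i < (collection.length : Int) then
        retvalue ++ [prefix1 ++ PySem.List.pyGetD collection i ""]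
      else
        retvalue ++ [prefix2 ++ PySem.List.pyGetD collection i ""])
    []

-- ===== PORT B =====
-- first while loop: while fast < n: append prefix1+collection[i]; i += 1; fast += 2
-- (returns the output so far together with the final i)
def pvAltLoop1 (prefix1 : String) (xs : List String) (n i fast : Nat) (out : List String) : (List String) × Nat :=
  if fast < n then
    pvAltLoop1 prefix1 xs n (i + 1) (fast + 2) (out ++ [prefix1 ++ xs.getD i ""])
  else (out, i)
termination_by n - fast

-- second while loop: while i < n: append prefix2+collection[i]; i += 1
def pvAltLoop2 (prefix2 : String) (xs : List String) (n i : Nat) (out : List String) : List String :=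
  if i < n then
    pvAltLoop2 prefix2 xs n (i + 1) (out ++ [prefix2 ++ xs.getD i ""])
  else out
termination_by n - i

def prefix_halfitem_with_alt (prefix1 : String) (prefix2 : String) (collection : List String) : List String :=
  let n := collection.length
  let r := pvAltLoop1 prefix1 collection n 0 0 []
  pvAltLoop2 prefix2 collection n r.2 r.1

-- ===== PRECONDITION & SPEC =====
def Spec_prefix_halfitem_with (prefix1 : String) (prefix2 : String) (collection : List String) (out : List String) : Prop := out = prefix_halfitem_with_alt prefix1 prefix2 collection
instance (prefix1 : String) (prefix2 : String) (collection : List String) (out : List String) : Decidable (Spec_prefix_halfitem_with prefix1 prefix2 collection out) := by unfold Spec_prefix_halfitem_with; infer_instance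

-- ===== CLAIM (what is proved, stated in full; the proofs are below) =====
def Claim_equal_prefix_halfitem_with : Prop := ∀ (prefix1 : String) (prefix2 : String) (collection : List String), Dom_prefix_halfitem_with prefix1 prefix2 collection → Spec_prefix_halfitem_with prefix1 prefix2 collection (prefix_halfitem_with prefix1 prefix2 collection)

-- ===== LEMMAS AND PROOFS =====

-- second loop appends prefix2 to everything from index i on
theorem pv_loop2_spec (p2 : String) (xs : List String) (i : Nat) (out : List String) :
    pvAltLoop2 p2 xs xs.length i out = out ++ (xs.drop i).map (fun x => p2 ++ x) := by
  by_cases h : i < xs.length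
  · rw [pvAltLoop2, if_pos h, pv_loop2_spec p2 xs (i + 1)]
    rw [List.drop_eq_getElem_cons h]
    simp only [List.map_cons, List.append_assoc, List.cons_append, List.nil_append,
      List.getD_eq_getElem xs "" h]
  · rw [pvAltLoop2, if_neg h]
    rw [List.drop_eq_nil_of_le (by omega)]
    simp
termination_by xs.length - i

-- first loop: started at (i, 2*i), it appends prefix1 to indices i … ⌈n/2⌉-1 and stops at ⌈n/2⌉
theorem pv_loop1_spec (p1 : String) (xs : List String) (i : Nat) (out : List String) :
    pvAltLoop1 p1 xs xs.length i (2 * i) out =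
      (out ++ ((xs.drop i).take ((xs.length + 1) / 2 - i)).map (fun x => p1 ++ x),
       max i ((xs.length + 1) / 2)) := by
  by_cases h : 2 * i < xs.length
  · rw [pvAltLoop1, if_pos h]
    have h2 : 2 * i + 2 = 2 * (i + 1) := by omega
    rw [h2, pv_loop1_spec p1 xs (i + 1)]
    have hi : i < xs.length := by omega
    have hs : i < (xs.length + 1) / 2 := by omega
    have hk : (xs.length + 1) / 2 - i = ((xs.length + 1) / 2 - (i + 1)) + 1 := by omega
    rw [List.drop_eq_getElem_cons hi, hk]
    simp only [List.take_succ_cons, List.map_cons, List.append_assoc, List.cons_append,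
      List.nil_append, List.getD_eq_getElem xs "" hi, Prod.mk.injEq, true_and]
    omega
  · rw [pvAltLoop1, if_neg h]
    have hs : (xs.length + 1) / 2 ≤ i := by omega
    rw [Nat.sub_eq_zero_of_le hs]
    simp
    omega
termination_by xs.length - 2 * i

-- ===== VERDICT (by name: the statement is the Claim_ definition above) =====
theorem prefix_halfitem_with_spec : Claim_equal_prefix_halfitem_with := by
  intro p1 p2 xs _
  unfold Spec_prefix_halfitem_with prefix_halfitem_with prefix_halfitem_with_alt
  set n : Nat := xs.length with hn
  set s : Nat := (n + 1) / 2 with hs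
  -- B's side: the two loops produce map over take s, then map over drop s
  have hB1 := pv_loop1_spec p1 xs 0 []
  simp only [Nat.mul_zero, List.drop_zero, Nat.sub_zero, List.nil_append, Nat.zero_max, ← hn, ← hs] at hB1
  have hB2 := pv_loop2_spec p2 xs s ((xs.take s).map (fun x => p1 ++ x))
  show _ = pvAltLoop2 p2 xs n (pvAltLoop1 p1 xs n 0 0 []).2 (pvAltLoop1 p1 xs n 0 0 []).1
  rw [hB1, hn, hB2]
  -- A's side: turn the foldl-append into a map over the range, split at s
  have hfold : (fun (retvalue : List String) (i : Int) =>
      if 2 * i < (n : Int) then retvalue ++ [p1 ++ PySem.List.pyGetD xs i ""]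
      else retvalue ++ [p2 ++ PySem.List.pyGetD xs i ""]) =
      fun retvalue i => retvalue ++
        [if 2 * i < (n : Int) then p1 ++ PySem.List.pyGetD xs i "" else p2 ++ PySem.List.pyGetD xs i ""] := by
    funext retvalue i; split <;> rfl
  rw [hfold, PySem.List.foldl_append_singleton_eq_map, List.nil_append]
  rw [PySem.List.pyRange_one_append 0 (s : Int) (n : Int) (by positivity) (by omega)]
  rw [List.map_append]
  congr 1
  · -- first half: condition 2*i < n holds for 0 ≤ i < s
    have hcong : (PySem.List.pyRange 0 (s : Int) 1).map
        (fun i => if 2 * i < (n : Int) then p1 ++ PySem.List.pyGetD xs i "" else p2 ++ PySem.List.pyGetD xs i "") =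
        (PySem.List.pyRange 0 (s : Int) 1).map (fun i => p1 ++ PySem.List.pyGetD xs i "") := by
      apply List.map_congr_left
      intro i hi
      rw [PySem.List.mem_pyRange_one] at hi
      have : 2 * i < (n : Int) := by omega
      simp [this]
    rw [hcong]
    have hlen : (xs.take s).length = s := by simp [List.length_take]; omega
    have h1 : (PySem.List.pyRange 0 (s : Int) 1).map (fun i => p1 ++ PySem.List.pyGetD xs i "") =
        (PySem.List.pyRange 0 (s : Int) 1).map (fun i => p1 ++ PySem.List.pyGetD (xs.take s) i "") := by
      apply List.map_congr_left
      intro i hi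
      rw [PySem.List.mem_pyRange_one] at hi
      have h0 : (0:Int) ≤ i := hi.1
      have hlt : i.toNat < s := by omega
      rw [PySem.List.pyGetD_eq_getElem xs "" h0 (by omega),
          PySem.List.pyGetD_eq_getElem (xs.take s) "" h0 (by rw [hlen]; omega)]
      simp [List.getElem_take]
    rw [h1]
    have h2 := PySem.List.map_pyGetD_pyRange_zero (xs := xs.take s) (d := "")
    simp only [PySem.List.len_eq, hlen] at h2
    calc (PySem.List.pyRange 0 (s : Int) 1).map (fun i => p1 ++ PySem.List.pyGetD (xs.take s) i "")
        = ((PySem.List.pyRange 0 (s : Int) 1).map (fun i => PySem.List.pyGetD (xs.take s) i "")).map (fun x => p1 ++ x) := by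
          rw [List.map_map]; rfl
      _ = (xs.take s).map (fun x => p1 ++ x) := by rw [h2]
  · -- second half: condition fails for s ≤ i < n
    have hcong : (PySem.List.pyRange (s : Int) (n : Int) 1).map
        (fun i => if 2 * i < (n : Int) then p1 ++ PySem.List.pyGetD xs i "" else p2 ++ PySem.List.pyGetD xs i "") =
        (PySem.List.pyRange (s : Int) (n : Int) 1).map (fun i => p2 ++ PySem.List.pyGetD xs i "") := by
      apply List.map_congr_left
      intro i hi
      rw [PySem.List.mem_pyRange_one] at hi
      have : ¬ (2 * i < (n : Int)) := by omega
      simp [this]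
    rw [hcong]
    have h := PySem.List.map_pyGetD_pyRange (xs := xs) (d := "") (a := (s : Int)) (by positivity)
    simp only [PySem.List.len_eq, ← hn, Int.toNat_natCast] at h
    calc (PySem.List.pyRange (s : Int) (n : Int) 1).map (fun i => p2 ++ PySem.List.pyGetD xs i "")
        = ((PySem.List.pyRange (s : Int) (n : Int) 1).map (fun i => PySem.List.pyGetD xs i "")).map (fun x => p2 ++ x) := by
          rw [List.map_map]; rfl
      _ = (xs.drop s).map (fun x => p2 ++ x) := by rw [h]
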